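-- pv_equiv track=rewrite | github.com/ugadarren/hypertarget-report-generator | app/services/location.py | _extract_tier_label_from_attrs
-- ===== SOURCE A (Python) =====
-- def _extract_tier_label_from_attrs(attrs: dict[str, str]) -> str | None:
--     for key, value in attrs.items():
--         if value in (None, ""):
--             continue
--         key_l = str(key).lower()
--         val = str(value).strip()
--         if "tier" in key_l:
--             return val
--     for key, value in attrs.items():
--         if value in (None, ""):
--             continue
--         key_l = str(key).lower()
--         val = str(value).strip()
--         if "designation" in key_l and ("tier" in val.lower() or "lower 40" in val.lower() or "bottom 40" in val.lower()):
--             return val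
--     return None
-- ===== SOURCE B (Python) =====
-- def _extract_tier_label_from_attrs(attrs: dict[str, str]) -> str | None:
--     designation = None
--     for key, value in attrs.items():
--         if value in (None, ""):
--             continue
--         key_l = str(key).lower()
--         val = str(value).strip()
--         if "tier" in key_l:
--             return val
--         if designation is None and "designation" in key_l:
--             val_l = val.lower()
--             if "tier" in val_l or "lower 40" in val_l or "bottom 40" in val_l:
--                 designation = val
--     return designation
-- ===== Notes on version B (the rewrite author's own statement) =====
-- stated objective: simpler
-- what changed: Replaces A's two priority-ordered scans over attrs.items() with a single pass that returns the first tier match eagerly and remembers the first qualifying designation value as a fallback returned after the loop.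
import Mathlib
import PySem

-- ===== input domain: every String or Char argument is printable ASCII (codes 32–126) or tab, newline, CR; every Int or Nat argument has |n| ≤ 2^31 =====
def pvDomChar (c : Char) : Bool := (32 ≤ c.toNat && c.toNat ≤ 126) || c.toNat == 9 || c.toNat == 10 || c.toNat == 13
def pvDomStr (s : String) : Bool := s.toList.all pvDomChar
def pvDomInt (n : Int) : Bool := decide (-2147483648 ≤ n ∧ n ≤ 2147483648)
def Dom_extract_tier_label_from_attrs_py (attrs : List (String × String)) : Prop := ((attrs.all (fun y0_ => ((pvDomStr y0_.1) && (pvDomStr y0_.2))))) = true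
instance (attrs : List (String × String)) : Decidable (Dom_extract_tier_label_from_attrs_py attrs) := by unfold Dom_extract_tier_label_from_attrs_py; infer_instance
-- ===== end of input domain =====

-- B collapses A's two prioritized scans into one pass with a remembered designation fallback (same O(n) cost, simpler).


-- ===== PORT A =====
-- first loop of A: return stripped value of first non-empty entry whose lowered key contains "tier"
def pvScanTier (attrs : List (String × String)) : Option String :=
  match attrs with
  | [] => none
  | (key, value) :: rest =>
    if value = "" then pvScanTier rest
    else
      if PySem.Str.isIn "tier" (PySem.Str.lower key) then some (PySem.Str.strip value)
      else pvScanTier rest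

-- the designation-value test of A's second loop
def pvDesigVal (val : String) : Bool :=
  PySem.Str.isIn "tier" (PySem.Str.lower val) || PySem.Str.isIn "lower 40" (PySem.Str.lower val) ||
    PySem.Str.isIn "bottom 40" (PySem.Str.lower val)

-- second loop of A
def pvScanDesig (attrs : List (String × String)) : Option String :=
  match attrs with
  | [] => none
  | (key, value) :: rest =>
    if value = "" then pvScanDesig rest
    else
      let val := PySem.Str.strip value
      if PySem.Str.isIn "designation" (PySem.Str.lower key) && pvDesigVal val then some val
      else pvScanDesig rest

def extract_tier_label_from_attrs_py (attrs : List (String × String)) : Option String :=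
  match pvScanTier attrs with
  | some v => some v
  | none => pvScanDesig attrs

-- ===== PORT B =====
-- B: one pass; eager return on a tier key, first qualifying designation value kept as fallback
def pvLoopB (attrs : List (String × String)) (designation : Option String) : Option String :=
  match attrs with
  | [] => designation
  | (key, value) :: rest =>
    if value = "" then pvLoopB rest designation
    else
      let key_l := PySem.Str.lower key
      let val := PySem.Str.strip value
      if PySem.Str.isIn "tier" key_l then some val
      else
        if designation.isNone && PySem.Str.isIn "designation" key_l &&
            (PySem.Str.isIn "tier" (PySem.Str.lower val) || PySem.Str.isIn "lower 40" (PySem.Str.lower val) ||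
              PySem.Str.isIn "bottom 40" (PySem.Str.lower val)) then
          pvLoopB rest (some val)
        else pvLoopB rest designation

def extract_tier_label_from_attrs_py_alt (attrs : List (String × String)) : Option String :=
  pvLoopB attrs none

-- ===== PRECONDITION & SPEC =====
def Spec_extract_tier_label_from_attrs_py (attrs : List (String × String)) (out : Option String) : Prop := out = extract_tier_label_from_attrs_py_alt attrs
instance (attrs : List (String × String)) (out : Option String) : Decidable (Spec_extract_tier_label_from_attrs_py attrs out) := by unfold Spec_extract_tier_label_from_attrs_py; infer_instance

-- ===== CLAIM (what is proved, stated in full; the proofs are below) =====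
def Claim_equal_extract_tier_label_from_attrs_py : Prop := ∀ (attrs : List (String × String)), Dom_extract_tier_label_from_attrs_py attrs → Spec_extract_tier_label_from_attrs_py attrs (extract_tier_label_from_attrs_py attrs)

-- ===== LEMMAS AND PROOFS =====


-- ===== VERDICT (by name: the statement is the Claim_ definition above) =====
-- loop invariant: B's single pass equals (tier scan) orelse (accumulator orelse designation scan)
theorem pvLoopB_eq (attrs : List (String × String)) (d : Option String) :
    pvLoopB attrs d = match pvScanTier attrs with
      | some v => some v
      | none => match d with
        | some w => some w
        | none => pvScanDesig attrs := by
  induction attrs generalizing d with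
  | nil => cases d <;> simp [pvLoopB, pvScanTier, pvScanDesig]
  | cons p rest ih =>
    obtain ⟨key, value⟩ := p
    by_cases h1 : value = ""
    · simp only [pvLoopB, pvScanTier, pvScanDesig, if_pos h1]
      exact ih d
    · by_cases h2 : PySem.Str.isIn "tier" (PySem.Str.lower key) = true
      · simp only [pvLoopB, pvScanTier, if_neg h1, if_pos h2]
      · by_cases h3 : (PySem.Str.isIn "designation" (PySem.Str.lower key) &&
            (PySem.Str.isIn "tier" (PySem.Str.lower (PySem.Str.strip value)) ||
              PySem.Str.isIn "lower 40" (PySem.Str.lower (PySem.Str.strip value)) ||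
              PySem.Str.isIn "bottom 40" (PySem.Str.lower (PySem.Str.strip value)))) = true
        · cases d with
          | none =>
            simp only [pvLoopB, pvScanTier, pvScanDesig, pvDesigVal, if_neg h1, if_neg h2,
              Option.isNone_none, Bool.true_and, if_pos h3, ih]
          | some w =>
            simp only [pvLoopB, pvScanTier, if_neg h1, if_neg h2,
              Option.isNone_some, Bool.false_and, ih]
            simp
        · cases d with
          | none =>
            simp only [pvLoopB, pvScanTier, pvScanDesig, pvDesigVal, if_neg h1, if_neg h2,
              Option.isNone_none, Bool.true_and, if_neg h3, ih]
          | some w =>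
            simp only [pvLoopB, pvScanTier, if_neg h1, if_neg h2,
              Option.isNone_some, Bool.false_and, ih]
            simp

theorem extract_tier_label_from_attrs_py_spec : Claim_equal_extract_tier_label_from_attrs_py := by
  intro attrs _
  unfold Spec_extract_tier_label_from_attrs_py extract_tier_label_from_attrs_py extract_tier_label_from_attrs_py_alt
  rw [pvLoopB_eq]
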